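-- pv_equiv track=rewrite | github.com/marcioaug/problems | 613-expondo-a-corrupcao.py | dfs
-- ===== SOURCE A (Python) =====
-- def dfs(graph, edge, visited, costs):
--     cost = costs[edge] if not visited[edge] else 0
--     members = [edge] if not visited[edge] else None
--
--     visited[edge] = True
--
--     for child in graph[edge]:
--         if not visited[child]:
--             c, m = dfs(graph, child, visited, costs)
--             cost += c
--             members += m
--
--     return cost, members
-- ===== SOURCE B (Python) =====
-- def dfs(graph, edge, visited, costs):
--     # Iterative DFS with an explicit stack instead of recursion.
--     # Like A, it marks reached nodes True in `visited` (in-place mutation).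
--     if visited[edge]:
--         cost, members = 0, None
--     else:
--         cost, members = costs[edge], [edge]
--     visited[edge] = True
--     stack = list(reversed(graph[edge]))
--     while stack:
--         node = stack.pop()
--         if visited[node]:
--             continue
--         visited[node] = True
--         cost += costs[node]
--         members.append(node)
--         for child in reversed(graph[node]):
--             stack.append(child)
--     return cost, members
-- ===== Notes on version B (the rewrite author's own statement) =====
-- stated objective: alternative
-- what changed: A's recursive DFS (recursing on each unvisited child, concatenating sub-results) is replaced by an iterative DFS with an explicit stack: one while loop that pops a node, marks it at pop time, accumulates cost and members, and reverse-pushes its children so preorder is preserved.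
import Mathlib
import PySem

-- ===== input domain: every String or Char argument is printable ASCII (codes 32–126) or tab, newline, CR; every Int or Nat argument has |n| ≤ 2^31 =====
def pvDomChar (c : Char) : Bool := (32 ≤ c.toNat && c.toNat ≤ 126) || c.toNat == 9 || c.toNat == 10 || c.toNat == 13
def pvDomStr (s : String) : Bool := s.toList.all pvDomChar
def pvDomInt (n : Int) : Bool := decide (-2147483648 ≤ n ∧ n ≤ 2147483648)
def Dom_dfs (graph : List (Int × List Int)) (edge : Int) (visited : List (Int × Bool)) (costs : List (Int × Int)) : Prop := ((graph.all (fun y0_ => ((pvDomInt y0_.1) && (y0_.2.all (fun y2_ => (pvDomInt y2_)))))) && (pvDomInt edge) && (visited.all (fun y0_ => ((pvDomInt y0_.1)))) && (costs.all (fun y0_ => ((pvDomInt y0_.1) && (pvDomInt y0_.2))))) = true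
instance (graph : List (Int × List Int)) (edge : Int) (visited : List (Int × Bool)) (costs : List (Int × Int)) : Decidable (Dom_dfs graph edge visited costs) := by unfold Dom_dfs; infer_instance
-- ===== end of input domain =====

-- B replaces A's recursion by an iterative DFS with an explicit stack (alternative decomposition,
-- same cost). Like A, the Python B marks the reached nodes True in `visited` (the observable
-- in-place mutation is identical); the equivalence proved here is about the return value.

-- ===== PORT A =====

-- Python `members += m` on the Option values: Python raises TypeError when members is None,
-- modelled by `none` propagating (that input is excluded by Pre_dfs).
def pyAddOpt (a b : Option (List Int)) : Option (List Int) :=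
  match a, b with
  | some x, some y => some (x ++ y)
  | _, _ => none

-- A's recursion, fuelled (the fuel only makes the recursion total; the fuel chosen in `dfs` below
-- is never exhausted — each recursive call flips one False entry of `visited` to True first).
-- In the `visited[edge]` branch Python re-marks visited[edge] = True and returns (0, None); its
-- loop body never runs where Python returns a value (an unvisited child there makes Python raise
-- TypeError, excluded by Pre_dfs), so the port returns directly in that branch.
def dfsA (g : PySem.Dict Int (List Int)) (cs : PySem.Dict Int Int) :
    Nat → Int → PySem.Dict Int Bool → PySem.Dict Int Bool × Int × Option (List Int)
  | 0, _, v => (v, 0, none)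
  | fuel+1, edge, v =>
    if v.getD edge true then
      (v.insert edge true, 0, none)
    else
      (g.getD edge []).foldl
        (fun st child =>
          if st.1.getD child true then st
          else
            let r := dfsA g cs fuel child st.1
            (r.1, st.2.1 + r.2.1, pyAddOpt st.2.2 r.2.2))
        (v.insert edge true, cs.getD edge 0, some [edge])

def dfs (graph : List (Int × List Int)) (edge : Int) (visited : List (Int × Bool)) (costs : List (Int × Int)) : Int × Option (List Int) :=
  let r := dfsA (PySem.Dict.mk graph) (PySem.Dict.mk costs) (visited.length + 1) edge (PySem.Dict.mk visited)
  (r.2.1, r.2.2)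

-- ===== PORT B =====

-- number of False entries of the visited dict: the termination measure of Source B's while loop
-- (each iteration either pops without pushing, or flips one False entry to True)
def pvFalse (v : PySem.Dict Int Bool) : Nat := v.items.countP (fun p => !p.2)

-- termination lemma for the stack loop (cited by `decreasing_by` below)
theorem countP_false_map_lt (k : Int) :
    ∀ (l : List (Int × Bool)), (k, false) ∈ l →
      l.countP (fun p => !(if p.1 = k then ((k, true) : Int × Bool) else p).2)
        < l.countP (fun p => !p.2) := by
  intro l
  induction l with
  | nil => intro h; simp at h
  | cons a t ih =>
    intro h
    simp only [List.countP_cons]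
    rcases List.mem_cons.mp h with h1 | h1
    · have ha : a = (k, false) := h1.symm
      subst ha
      have hle : t.countP (fun p => !(if p.1 = k then ((k, true) : Int × Bool) else p).2)
          ≤ t.countP (fun p => !p.2) := by
        apply List.countP_mono_left
        intro x _ hx
        by_cases hxk : x.1 = k <;> simp [hxk] at hx ⊢; simp_all
      norm_num
      omega
    · have hlt := ih h1
      by_cases hak : a.1 = k
      · simp only [hak]
        cases ha2 : a.2 <;> simp <;> omega
      · simp only [if_neg hak]
        omega

theorem pvFalse_insert_lt (v : PySem.Dict Int Bool) (k : Int)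
    (h : v.getD k true = false) : pvFalse (v.insert k true) < pvFalse v := by
  have hg : v.get? k = some false := by
    rcases hq : v.get? k with _ | b
    · simp [PySem.Dict.getD_eq_get?_getD, hq] at h
    · cases b
      · rfl
      · simp [PySem.Dict.getD_eq_get?_getD, hq] at h
  have hmem : (k, false) ∈ v.items := PySem.Dict.mem_items_of_get?_eq_some _ hg
  have hcont : v.contains k = true := by
    rw [PySem.Dict.contains_eq_isSome_get?, hg]; rfl
  unfold pvFalse
  rw [PySem.Dict.items_insert_of_contains _ _ hcont, List.countP_map]
  have : ((fun (p : Int × Bool) => !p.2) ∘ fun p => if p.1 == k then (k, true) else p)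
      = fun p => !(if p.1 = k then ((k, true) : Int × Bool) else p).2 := by
    funext p; by_cases hp : p.1 = k <;> simp [hp]
  rw [this]
  exact countP_false_map_lt k v.items hmem

-- Source B's while loop. The stack is modelled head-as-top (Python pops from the END of its list);
-- Source B pushes reversed(graph[node]) one element at a time at the end, which with head-as-top is
-- exactly prepending graph[node] in its original order (and list(reversed(graph[edge]))
-- is graph[edge] itself in this representation).
def dfsB (g : PySem.Dict Int (List Int)) (cs : PySem.Dict Int Int) :
    List Int → PySem.Dict Int Bool → Int → List Int → PySem.Dict Int Bool × Int × List Int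
  | [], v, c, m => (v, c, m)
  | node :: stack, v, c, m =>
    if _h : v.getD node true then
      dfsB g cs stack v c m
    else
      dfsB g cs (g.getD node [] ++ stack) (v.insert node true) (c + cs.getD node 0) (m ++ [node])
termination_by stack v _ _ => (pvFalse v, stack.length)
decreasing_by
  · exact Prod.Lex.right _ (by simp)
  · exact Prod.Lex.left _ _ (pvFalse_insert_lt v node (by simpa using _h))

-- In Source B's members-is-None branch the while loop, wherever the Python returns, only pops
-- already-visited nodes and changes nothing (an unvisited one makes `members.append` raise on
-- None, excluded by Pre_dfs), so the port returns (0, none) directly in that branch.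
def dfs_alt (graph : List (Int × List Int)) (edge : Int) (visited : List (Int × Bool)) (costs : List (Int × Int)) : Int × Option (List Int) :=
  let vd := PySem.Dict.mk visited
  if vd.getD edge true then (0, none)
  else
    let r := dfsB (PySem.Dict.mk graph) (PySem.Dict.mk costs) ((PySem.Dict.mk graph).getD edge [])
      (vd.insert edge true) ((PySem.Dict.mk costs).getD edge 0) [edge]
    (r.2.1, some r.2.2)

-- ===== PRECONDITION & SPEC =====
-- one expansion step of the reachable-set computation used by Pre_dfs: add every child (of a node
-- already in S) whose visited entry is False
def pvExpand (graph : List (Int × List Int)) (visited : List (Int × Bool)) (S : List Int) : List Int :=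
  S ++ ((graph.filter (fun p => S.contains p.1)).flatMap (·.2)).filter
        (fun c => (List.lookup c visited == some false) && !(S.contains c))

-- the nodes A's traversal expands, as a plain iterated transitive closure of the
-- unvisited-child relation (this is a graph-theoretic characterisation, not the ports' traversal:
-- it computes no costs, no members, no visited updates)
def pvReach (graph : List (Int × List Int)) (visited : List (Int × Bool)) (edge : Int) : List Int :=
  (pvExpand graph visited)^[visited.length + 1] [edge]

-- Pre_dfs is exactly the set of inputs on which the Python A returns normally: the start node is a
-- visited key; if it is already visited, its children must all be visited-True (an unvisited child
-- makes A raise TypeError on `None += list`, a missing one KeyError); otherwise every node the DFS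
-- expands (the closure above) must be a key of graph and costs and have all its children keyed in
-- visited (anything less makes A raise KeyError).
def Pre_dfs (graph : List (Int × List Int)) (edge : Int) (visited : List (Int × Bool)) (costs : List (Int × Int)) : Prop :=
  edge ∈ visited.map (·.1) ∧
  (if List.lookup edge visited = some true then
      edge ∈ graph.map (·.1) ∧
      ∀ c ∈ (List.lookup edge graph).getD [], List.lookup c visited = some true
    else
      ∀ x ∈ pvReach graph visited edge,
        x ∈ graph.map (·.1) ∧ x ∈ costs.map (·.1) ∧
        ∀ c ∈ (List.lookup x graph).getD [], c ∈ visited.map (·.1))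

instance (graph : List (Int × List Int)) (edge : Int) (visited : List (Int × Bool)) (costs : List (Int × Int)) : Decidable (Pre_dfs graph edge visited costs) := by unfold Pre_dfs; infer_instance

def pvWitness_dfs : (List (Int × List Int)) × Int × (List (Int × Bool)) × (List (Int × Int)) :=
  ([(0, [1]), (1, [0])], 0, [(0, false), (1, false)], [(0, 3), (1, 4)])

def Spec_dfs (graph : List (Int × List Int)) (edge : Int) (visited : List (Int × Bool)) (costs : List (Int × Int)) (out : Int × Option (List Int)) : Prop := out = dfs_alt graph edge visited costs
instance (graph : List (Int × List Int)) (edge : Int) (visited : List (Int × Bool)) (costs : List (Int × Int)) (out : Int × Option (List Int)) : Decidable (Spec_dfs graph edge visited costs out) := by unfold Spec_dfs; infer_instance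

-- ===== CLAIM (what is proved, stated in full; the proofs are below) =====
def Claim_equal_dfs : Prop := ∀ (graph : List (Int × List Int)) (edge : Int) (visited : List (Int × Bool)) (costs : List (Int × Int)), Dom_dfs graph edge visited costs → Pre_dfs graph edge visited costs → Spec_dfs graph edge visited costs (dfs graph edge visited costs)

-- ===== LEMMAS AND PROOFS =====

theorem pvFalse_pos (v : PySem.Dict Int Bool) (k : Int)
    (h : v.getD k true = false) : 1 ≤ pvFalse v := by
  have hg : v.get? k = some false := by
    rcases hq : v.get? k with _ | b
    · simp [PySem.Dict.getD_eq_get?_getD, hq] at h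
    · cases b
      · rfl
      · simp [PySem.Dict.getD_eq_get?_getD, hq] at h
  have hmem : (k, false) ∈ v.items := PySem.Dict.mem_items_of_get?_eq_some _ hg
  unfold pvFalse
  exact List.countP_pos_iff.mpr ⟨(k, false), hmem, by simp⟩

-- the body of A's inner for-loop, named so the proofs can rewrite with it
def stepA (g : PySem.Dict Int (List Int)) (cs : PySem.Dict Int Int) (fuel : Nat)
    (st : PySem.Dict Int Bool × Int × Option (List Int)) (child : Int) :
    PySem.Dict Int Bool × Int × Option (List Int) :=
  if st.1.getD child true then st
  else
    let r := dfsA g cs fuel child st.1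
    (r.1, st.2.1 + r.2.1, pyAddOpt st.2.2 r.2.2)

theorem dfsA_succ (g : PySem.Dict Int (List Int)) (cs : PySem.Dict Int Int)
    (fuel : Nat) (edge : Int) (v : PySem.Dict Int Bool) :
    dfsA g cs (fuel + 1) edge v
      = if v.getD edge true then (v.insert edge true, 0, none)
        else (g.getD edge []).foldl (stepA g cs fuel)
          (v.insert edge true, cs.getD edge 0, some [edge]) := by
  rw [dfsA]; rfl

theorem stepA_vis (g : PySem.Dict Int (List Int)) (cs : PySem.Dict Int Int) (fuel : Nat)
    (st : PySem.Dict Int Bool × Int × Option (List Int)) (child : Int)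
    (h : st.1.getD child true = true) : stepA g cs fuel st child = st := by
  simp [stepA, h]

theorem stepA_unvis (g : PySem.Dict Int (List Int)) (cs : PySem.Dict Int Int) (fuel : Nat)
    (st : PySem.Dict Int Bool × Int × Option (List Int)) (child : Int)
    (h : st.1.getD child true = false) :
    stepA g cs fuel st child
      = ((dfsA g cs fuel child st.1).1, st.2.1 + (dfsA g cs fuel child st.1).2.1,
          pyAddOpt st.2.2 (dfsA g cs fuel child st.1).2.2) := by
  simp [stepA, h]

theorem dfsB_nil (g : PySem.Dict Int (List Int)) (cs : PySem.Dict Int Int)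
    (v : PySem.Dict Int Bool) (c : Int) (m : List Int) :
    dfsB g cs [] v c m = (v, c, m) := by
  rw [dfsB]

theorem dfsB_vis (g : PySem.Dict Int (List Int)) (cs : PySem.Dict Int Int)
    (node : Int) (s : List Int) (v : PySem.Dict Int Bool) (c : Int) (m : List Int)
    (h : v.getD node true = true) :
    dfsB g cs (node :: s) v c m = dfsB g cs s v c m := by
  rw [dfsB]; simp [h]

theorem dfsB_unvis (g : PySem.Dict Int (List Int)) (cs : PySem.Dict Int Int)
    (node : Int) (s : List Int) (v : PySem.Dict Int Bool) (c : Int) (m : List Int)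
    (h : v.getD node true = false) :
    dfsB g cs (node :: s) v c m
      = dfsB g cs (g.getD node [] ++ s) (v.insert node true) (c + cs.getD node 0) (m ++ [node]) := by
  rw [dfsB]; simp [h]

-- The heart of the proof, by strong induction on the number of still-False visited entries and,
-- inside, structural induction on the child list:
-- (1) A's inner loop over `children` computes exactly the stack loop started on `children`;
-- (2) the stack loop splits over ++ (the part after `rest` runs on the state the first part left);
-- (3) the stack loop is affine in its cost/members accumulators;
-- (4) the stack loop never un-marks a node (the measure is monotone).
theorem main_lemma (g : PySem.Dict Int (List Int)) (cs : PySem.Dict Int Int) :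
    ∀ (n : Nat) (children : List Int) (rest : List Int) (v : PySem.Dict Int Bool)
      (c c0 : Int) (m m0 : List Int) (fuel : Nat),
      pvFalse v ≤ n → pvFalse v < fuel →
      (children.foldl (stepA g cs fuel) (v, c, some m)
        = ((dfsB g cs children v c m).1, (dfsB g cs children v c m).2.1,
            some (dfsB g cs children v c m).2.2)) ∧
      (dfsB g cs (children ++ rest) v c m
        = dfsB g cs rest (dfsB g cs children v c m).1 (dfsB g cs children v c m).2.1
            (dfsB g cs children v c m).2.2) ∧
      (dfsB g cs children v (c0 + c) (m0 ++ m)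
        = ((dfsB g cs children v c m).1, c0 + (dfsB g cs children v c m).2.1,
            m0 ++ (dfsB g cs children v c m).2.2)) ∧
      pvFalse (dfsB g cs children v c m).1 ≤ pvFalse v := by
  intro n
  induction n using Nat.strong_induction_on with
  | _ n IH =>
  intro children
  induction children with
  | nil =>
    intro rest v c c0 m m0 fuel hn hf
    refine ⟨?_, ?_, ?_, ?_⟩
    · simp [dfsB_nil]
    · simp [dfsB_nil]
    · simp [dfsB_nil]
    · simp [dfsB_nil]
  | cons child cstail ihc =>
    intro rest v c c0 m m0 fuel hn hf
    by_cases hv : v.getD child true = true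
    · obtain ⟨a1, b1, c1', d1⟩ := ihc rest v c c0 m m0 fuel hn hf
      refine ⟨?_, ?_, ?_, ?_⟩
      · rw [List.foldl_cons, stepA_vis _ _ _ _ _ hv, dfsB_vis _ _ _ _ _ _ _ hv]; exact a1
      · rw [List.cons_append, dfsB_vis _ _ _ _ _ _ _ hv, dfsB_vis _ _ _ _ _ _ _ hv]; exact b1
      · rw [dfsB_vis _ _ _ _ _ _ _ hv, dfsB_vis _ _ _ _ _ _ _ hv]; exact c1'
      · rw [dfsB_vis _ _ _ _ _ _ _ hv]; exact d1
    · have hv' : v.getD child true = false := by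
        cases hq : v.getD child true
        · rfl
        · exact absurd hq hv
      have hlt := pvFalse_insert_lt v child hv'
      have hpos := pvFalse_pos v child hv'
      obtain ⟨f, rfl⟩ : ∃ f, fuel = f + 1 := ⟨fuel - 1, by omega⟩
      have OH := IH (pvFalse (v.insert child true)) (by omega)
      rcases hret : dfsB g cs (g.getD child []) (v.insert child true) (cs.getD child 0) [child]
        with ⟨vr, crr, mr⟩
      have hb1 : pvFalse (v.insert child true) < f := by omega
      obtain ⟨ar, -, -, dr⟩ := OH (g.getD child []) [] (v.insert child true)
        (cs.getD child 0) 0 [child] [] f (le_refl _) hb1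
      rw [hret] at ar dr
      simp only at ar dr
      have hA : dfsA g cs (f + 1) child v = (vr, crr, some mr) := by
        rw [dfsA_succ]; simp only [hv', Bool.false_eq_true, if_false]
        exact ar
      obtain ⟨-, -, O2, -⟩ := OH (g.getD child []) [] (v.insert child true)
        (cs.getD child 0) c [child] m f (le_refl _) hb1
      rw [hret] at O2
      simp only at O2
      obtain ⟨-, O1, -, -⟩ := OH (g.getD child []) cstail (v.insert child true)
        (c + cs.getD child 0) 0 (m ++ [child]) [] f (le_refl _) hb1
      rw [O2] at O1
      simp only at O1
      obtain ⟨-, O3, -, -⟩ := OH (g.getD child []) (cstail ++ rest) (v.insert child true)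
        (c + cs.getD child 0) 0 (m ++ [child]) [] f (le_refl _) hb1
      rw [O2] at O3
      simp only at O3
      have hstep2 : dfsB g cs (child :: cstail) v c m
          = dfsB g cs cstail vr (c + crr) (m ++ mr) := by
        rw [dfsB_unvis _ _ _ _ _ _ _ hv', O1]
      have hd : pvFalse vr ≤ n := by omega
      obtain ⟨ai, bi, ci, di⟩ := ihc rest vr (c + crr) c0 (m ++ mr) m0 (f + 1) hd (by omega)
      refine ⟨?_, ?_, ?_, ?_⟩
      · rw [List.foldl_cons, stepA_unvis _ _ _ _ _ hv']
        simp only [hA]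
        have hpy : pyAddOpt (some m) (some mr) = some (m ++ mr) := rfl
        simp only [hpy]
        rw [hstep2]
        exact ai
      · rw [List.cons_append, dfsB_unvis _ _ _ _ _ _ _ hv', O3, hstep2]
        exact bi
      · obtain ⟨-, -, O4, -⟩ := OH (g.getD child [] ++ cstail) [] (v.insert child true)
          (c + cs.getD child 0) c0 (m ++ [child]) m0 f (le_refl _) hb1
        rw [dfsB_unvis _ _ _ _ _ _ _ hv', dfsB_unvis _ _ _ _ _ _ _ hv']
        rw [add_assoc, List.append_assoc]
        exact O4
      · rw [hstep2]
        calc pvFalse (dfsB g cs cstail vr (c + crr) (m ++ mr)).1 ≤ pvFalse vr := di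
          _ ≤ pvFalse v := by omega

-- the two programs agree on EVERY input of the typed domain (Pre_dfs is only needed for the
-- Python side, where A raises outside it)
theorem dfs_eq (graph : List (Int × List Int)) (edge : Int) (visited : List (Int × Bool)) (costs : List (Int × Int)) :
    dfs graph edge visited costs = dfs_alt graph edge visited costs := by
  unfold dfs dfs_alt
  by_cases hv : (PySem.Dict.mk visited).getD edge true = true
  · simp only [dfsA_succ, hv, if_true]
  · have hv' : (PySem.Dict.mk visited).getD edge true = false := by
      cases hq : (PySem.Dict.mk visited).getD edge true
      · rfl
      · exact absurd hq hv
    have hlt := pvFalse_insert_lt (PySem.Dict.mk visited) edge hv'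
    have hlen : pvFalse (PySem.Dict.mk visited) ≤ visited.length := by
      unfold pvFalse
      exact List.countP_le_length
    obtain ⟨ha, -, -, -⟩ := main_lemma (PySem.Dict.mk graph) (PySem.Dict.mk costs)
      (pvFalse ((PySem.Dict.mk visited).insert edge true))
      ((PySem.Dict.mk graph).getD edge []) []
      ((PySem.Dict.mk visited).insert edge true)
      ((PySem.Dict.mk costs).getD edge 0) 0 [edge] [] visited.length
      (le_refl _) (by omega)
    simp only [dfsA_succ, hv', Bool.false_eq_true, if_false, ha]

-- ===== VERDICT (by name: the statement is the Claim_ definition above) =====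
theorem dfs_spec : Claim_equal_dfs := by
  intro graph edge visited costs _ _
  exact dfs_eq graph edge visited costs
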